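-- pv_equiv track=rewrite | github.com/emms204/ScriptGen | src/TextGen_refactored/utils/text_processing.py | detect_repetition_loop
-- ===== SOURCE A (Python) =====
-- def detect_repetition_loop(text: str, max_repetitions: int = 4) -> bool:
--     """Detect repetition loops in text.
--
--     Args:
--         text: Text to check for repetitions
--         max_repetitions: Maximum number of repetitions to tolerate
--
--     Returns:
--         True if a repetition loop is detected, False otherwise
--     """
--     # Split into lines for analysis
--     lines = text.splitlines()
--
--     # Need at least this many lines to detect a pattern
--     min_lines_for_pattern = 6
--
--     if len(lines) < min_lines_for_pattern:
--         return False
--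
--     # Try different pattern lengths
--     for pattern_length in range(1, min(10, len(lines) // 2)):
--         repetition_count = 0
--
--         # Start from the end and check backwards
--         for i in range(len(lines) - pattern_length, 0, -pattern_length):
--             current_chunk = lines[i:i + pattern_length]
--             previous_chunk = lines[i - pattern_length:i]
--
--             # Check if chunks are equal (simple string comparison)
--             if current_chunk == previous_chunk:
--                 repetition_count += 1
--
--                 if repetition_count >= max_repetitions:
--                     return True
--             else:
--                 break
--
--     return False
-- ===== SOURCE B (Python) =====
-- def detect_repetition_loop(text: str, max_repetitions: int = 4) -> bool:
--     lines = text.splitlines()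
--     n = len(lines)
--     if n < 6:
--         return False
--     copies = max(max_repetitions, 1) + 1
--     for p in range(1, min(10, n // 2)):
--         if n >= copies * p and lines[n - copies * p:] == lines[n - p:] * copies:
--             return True
--     return False
-- ===== Notes on version B (the rewrite author's own statement) =====
-- stated objective: simpler
-- what changed: A counts equal adjacent chunks walking backwards with an early-break inner loop and a repetition counter; B tests, per pattern length p, a single suffix slice equality lines[n-N*p:] == lines[n-p:]*N with N = max(max_repetitions,1)+1 copies, exploiting transitivity of adjacent chunk equality.
import Mathlib
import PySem

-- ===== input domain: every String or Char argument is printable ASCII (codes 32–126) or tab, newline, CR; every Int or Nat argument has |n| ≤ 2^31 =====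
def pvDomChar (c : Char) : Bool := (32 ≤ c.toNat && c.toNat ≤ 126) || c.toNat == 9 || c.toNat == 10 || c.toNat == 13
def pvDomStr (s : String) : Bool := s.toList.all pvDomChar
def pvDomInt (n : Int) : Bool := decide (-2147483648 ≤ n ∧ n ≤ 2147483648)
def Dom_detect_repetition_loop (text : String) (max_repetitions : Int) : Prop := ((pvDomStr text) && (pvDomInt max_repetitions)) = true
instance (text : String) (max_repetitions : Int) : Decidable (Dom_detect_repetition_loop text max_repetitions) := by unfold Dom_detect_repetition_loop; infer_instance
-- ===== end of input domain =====

-- B replaces A's backward adjacent-chunk scan with a running counter by one repeated-block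
-- suffix slice comparison per pattern length (objective: simpler).

-- ===== PORT A =====
-- inner loop: for i in range(len(lines) - pattern_length, 0, -pattern_length), with break / early return
def pvScanA (lines : List String) (p : Int) (maxr : Int) : List Int → Int → Bool
  | [], _ => false
  | i :: rest, count =>
    if PySem.List.slice lines (some i) (some (i + p)) = PySem.List.slice lines (some (i - p)) (some i) then
      if count + 1 ≥ maxr then true
      else pvScanA lines p maxr rest (count + 1)
    else false

-- outer loop: for pattern_length in range(1, min(10, len(lines) // 2)), with early return
def pvOuterA (lines : List String) (maxr : Int) : List Int → Bool
  | [] => false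
  | p :: ps =>
    if pvScanA lines p maxr (PySem.List.pyRange ((lines.length : Int) - p) 0 (-p)) 0 then true
    else pvOuterA lines maxr ps

def detect_repetition_loop (text : String) (max_repetitions : Int) : Bool :=
  let lines := PySem.Str.splitlines text
  let min_lines_for_pattern : Int := 6
  if (lines.length : Int) < min_lines_for_pattern then false
  else pvOuterA lines max_repetitions
    (PySem.List.pyRange 1 (min 10 (PySem.Int.floordiv (lines.length : Int) 2)) 1)

-- ===== PORT B =====
-- for p in range(1, min(10, n // 2)): if n >= copies*p and lines[n-copies*p:] == lines[n-p:]*copies: return True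
def pvLoopB (lines : List String) (copies : Int) : List Int → Bool
  | [] => false
  | p :: ps =>
    if copies * p ≤ (lines.length : Int) ∧
        PySem.List.slice lines (some ((lines.length : Int) - copies * p)) none
          = PySem.List.pyRepeat (PySem.List.slice lines (some ((lines.length : Int) - p)) none) copies
    then true else pvLoopB lines copies ps

def detect_repetition_loop_alt (text : String) (max_repetitions : Int) : Bool :=
  let lines := PySem.Str.splitlines text
  if (lines.length : Int) < 6 then false
  else
    let copies := max max_repetitions 1 + 1
    pvLoopB lines copies (PySem.List.pyRange 1 (min 10 (PySem.Int.floordiv (lines.length : Int) 2)) 1)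

-- ===== PRECONDITION & SPEC =====
def Spec_detect_repetition_loop (text : String) (max_repetitions : Int) (out : Bool) : Prop := out = detect_repetition_loop_alt text max_repetitions
instance (text : String) (max_repetitions : Int) (out : Bool) : Decidable (Spec_detect_repetition_loop text max_repetitions out) := by unfold Spec_detect_repetition_loop; infer_instance

-- ===== CLAIM (what is proved, stated in full; the proofs are below) =====
def Claim_equal_detect_repetition_loop : Prop := ∀ (text : String) (max_repetitions : Int), Dom_detect_repetition_loop text max_repetitions → Spec_detect_repetition_loop text max_repetitions (detect_repetition_loop text max_repetitions)

-- ===== LEMMAS AND PROOFS =====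

-- "the last k blocks of length pn all equal the final block (and fit)"
def pvGoodB (ls : List String) (pn k : Nat) : Bool :=
  decide (k * pn ≤ ls.length ∧
    ls.drop (ls.length - k * pn) = (List.replicate k (ls.drop (ls.length - pn))).flatten)

-- countdown range with general negative step: empty case
theorem pvRange_neg_nil (a p : Int) (hp : 0 < p) (ha : a ≤ 0) :
    PySem.List.pyRange a 0 (-p) = [] := by
  have hne : ¬(-p = 0) := by omega
  have hns : ¬((0:Int) < -p) := by omega
  have hlt : ¬((0:Int) < a) := by omega
  simp only [PySem.List.pyRange, if_neg hne, if_neg hns, if_neg hlt, List.range_zero,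
    List.map_nil]

-- countdown range with general negative step: cons case
theorem pvRange_neg_cons (a p : Int) (hp : 0 < p) (ha : 0 < a) :
    PySem.List.pyRange a 0 (-p) = a :: PySem.List.pyRange (a - p) 0 (-p) := by
  have hne : ¬(-p = 0) := by omega
  have hns : ¬((0:Int) < -p) := by omega
  simp only [PySem.List.pyRange, if_neg hne, if_neg hns, neg_neg, sub_zero, if_pos ha]
  by_cases hap : (0:Int) < a - p
  · rw [if_pos hap]
    have e1 : a + p - 1 = (a - 1) + 1 * p := by ring
    have e2 : a - p + p - 1 = a - 1 := by ring
    rw [e1, e2, Int.add_mul_ediv_right _ _ (show p ≠ 0 by omega)]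
    have h3 : 0 ≤ (a - 1) / p := Int.ediv_nonneg (by omega) (by omega)
    rw [show ((a - 1) / p + 1).toNat = ((a - 1) / p).toNat + 1 from by omega,
        List.range_succ_eq_map, List.map_cons, List.map_map]
    have hfun : ((fun k : Nat => a + -p * (k : Int)) ∘ Nat.succ)
        = (fun k : Nat => (a - p) + -p * (k : Int)) := by
      funext k; simp only [Function.comp_apply, Nat.succ_eq_add_one]; push_cast; ring
    rw [hfun]
    norm_num
  · rw [if_neg hap]
    have e1 : a + p - 1 = (a - 1) + 1 * p := by ring
    rw [e1, Int.add_mul_ediv_right _ _ (show p ≠ 0 by omega),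
        Int.ediv_eq_zero_of_lt (by omega) (by omega)]
    norm_num

-- dropping q whole blocks from q+t copies leaves t copies
theorem pvDropRep {α : Type} (b : List α) (pn : Nat) (hb : b.length = pn) (t : Nat) :
    ∀ q : Nat, ((List.replicate (q + t) b).flatten).drop (q * pn) = (List.replicate t b).flatten := by
  intro q
  induction q with
  | zero => simp
  | succ q ih =>
    rw [show q + 1 + t = (q + t) + 1 from by omega, List.replicate_succ, List.flatten_cons,
        show (q + 1) * pn = b.length + q * pn from by rw [hb]; ring,
        ← List.drop_drop, List.drop_left]
    exact ih

-- monotonicity: if the last m blocks repeat, so do the last k ≤ m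
theorem pvGood_mono (ls : List String) (pn k m : Nat) (hkm : k ≤ m) (hpl : pn ≤ ls.length)
    (hm : m * pn ≤ ls.length)
    (he : ls.drop (ls.length - m * pn) = (List.replicate m (ls.drop (ls.length - pn))).flatten) :
    k * pn ≤ ls.length ∧
      ls.drop (ls.length - k * pn) = (List.replicate k (ls.drop (ls.length - pn))).flatten := by
  have hkk : k * pn ≤ m * pn := mul_le_mul_right' hkm pn
  refine ⟨le_trans hkk hm, ?_⟩
  have hb : (ls.drop (ls.length - pn)).length = pn := by rw [List.length_drop]; omega
  have hmm : (m - k) * pn + k * pn = m * pn := by rw [← Nat.add_mul]; congr 1; omega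
  have key : ls.drop (ls.length - k * pn)
      = ((List.replicate ((m - k) + k) (ls.drop (ls.length - pn))).flatten).drop ((m - k) * pn) := by
    rw [show (m - k) + k = m from by omega, ← he, List.drop_drop]
    congr 1
    omega
  rw [key]
  exact pvDropRep _ pn hb k (m - k)

-- main lemma: the backward scan with count j equals the repeated-suffix test for rn+1 copies
theorem pvScan_eq (ls : List String) (pn : Nat) (hp : 1 ≤ pn) (maxr : Int) (rn : Nat)
    (hr : (rn : Int) = max maxr 1) :
    ∀ d j : Nat, rn = j + d → 0 < d →
    (j + 1) * pn ≤ ls.length →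
    ls.drop (ls.length - (j + 1) * pn) = (List.replicate (j + 1) (ls.drop (ls.length - pn))).flatten →
    pvScanA ls (pn : Int) maxr
        (PySem.List.pyRange ((ls.length : Int) - (((j + 1) * pn : Nat) : Int)) 0 (-(pn : Int))) (j : Int)
      = pvGoodB ls pn (rn + 1) := by
  intro d
  induction d with
  | zero => intro j _ h0 _ _; exact absurd h0 (lt_irrefl 0)
  | succ d ih =>
    intro j hdj _ hle he
    have hpn_le : pn ≤ ls.length :=
      le_trans (le_mul_of_one_le_left (Nat.zero_le _) (by omega : 1 ≤ j + 1)) hle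
    have hblen : (ls.drop (ls.length - pn)).length = pn := by
      rw [List.length_drop]; omega
    set K := (j + 1) * pn with hKdef
    by_cases hi : ls.length ≤ K
    · have hnil : PySem.List.pyRange ((ls.length : Int) - ((K : Nat) : Int)) 0 (-(pn : Int)) = [] :=
        pvRange_neg_nil _ _ (by omega) (by omega)
      rw [hnil]
      have hg : pvGoodB ls pn (rn + 1) = false := by
        unfold pvGoodB
        apply decide_eq_false
        rintro ⟨h1, -⟩
        have h2 : (rn + 1) * pn ≤ (j + 1) * pn := by rw [← hKdef]; exact le_trans h1 hi
        have h3 : rn + 1 ≤ j + 1 := Nat.le_of_mul_le_mul_right h2 (by omega)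
        omega
      rw [hg]
      simp [pvScanA]
    · push_neg at hi
      have hcons : PySem.List.pyRange ((ls.length : Int) - ((K : Nat) : Int)) 0 (-(pn : Int))
          = ((ls.length - K : Nat) : Int)
            :: PySem.List.pyRange (((ls.length - K : Nat) : Int) - (pn : Int)) 0 (-(pn : Int)) := by
        rw [show ((ls.length : Int) - ((K : Nat) : Int)) = ((ls.length - K : Nat) : Int) from by omega]
        exact pvRange_neg_cons _ _ (by omega) (by omega)
      rw [hcons]
      simp only [pvScanA]
      have hcur : PySem.List.slice ls (some ((ls.length - K : Nat) : Int))
            (some (((ls.length - K : Nat) : Int) + (pn : Int)))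
          = ls.drop (ls.length - pn) := by
        rw [PySem.List.slice_natCast_add, he, List.replicate_succ, List.flatten_cons,
            List.take_left' hblen]
      by_cases hw : K + pn ≤ ls.length
      · have hprev : PySem.List.slice ls (some (((ls.length - K : Nat) : Int) - (pn : Int)))
              (some ((ls.length - K : Nat) : Int))
            = (ls.drop (ls.length - K - pn)).take pn := by
          rw [show (((ls.length - K : Nat) : Int) - (pn : Int)) = ((ls.length - K - pn : Nat) : Int) from by omega,
              show ((ls.length - K : Nat) : Int) = (((ls.length - K - pn : Nat) : Int) + (pn : Int)) from by omega,
              PySem.List.slice_natCast_add]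
        rw [hcur, hprev]
        have hK2 : (j + 1 + 1) * pn = K + pn := by rw [hKdef]; ring
        by_cases hmatch : ls.drop (ls.length - pn) = (ls.drop (ls.length - K - pn)).take pn
        · rw [if_pos hmatch]
          have he2 : ls.drop (ls.length - (j + 1 + 1) * pn)
              = (List.replicate (j + 1 + 1) (ls.drop (ls.length - pn))).flatten := by
            have hsplit : ls.drop (ls.length - K - pn)
                = (ls.drop (ls.length - K - pn)).take pn ++ (ls.drop (ls.length - K - pn)).drop pn :=
              (List.take_append_drop pn (ls.drop (ls.length - K - pn))).symm
            have hdd : (ls.drop (ls.length - K - pn)).drop pn = ls.drop (ls.length - K) := by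
              rw [List.drop_drop]; congr 1; omega
            rw [show ls.length - (j + 1 + 1) * pn = ls.length - K - pn from by rw [hK2]; omega,
                hsplit, hdd, he, ← hmatch, List.replicate_succ, List.flatten_cons,
                List.replicate_succ, List.flatten_cons, List.replicate_succ, List.flatten_cons]
          by_cases hts : (j : Int) + 1 ≥ maxr
          · rw [if_pos hts]
            have h1 : (rn : Int) ≤ (j : Int) + 1 := by
              rw [hr]; exact max_le hts (by omega)
            have hd0 : rn = j + 1 := by omega
            have hg : pvGoodB ls pn (rn + 1) = true := by
              unfold pvGoodB
              apply decide_eq_true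
              refine ⟨?_, ?_⟩
              · rw [hd0, hK2]; omega
              · rw [hd0]; exact he2
            rw [hg]
          · rw [if_neg hts]
            have h1 : (j : Int) + 1 < maxr := by omega
            have h2 : (rn : Int) = maxr := by rw [hr]; exact max_eq_left (by omega)
            have hd1 : j + 1 < rn := by omega
            have harg : (((ls.length - K : Nat) : Int) - (pn : Int))
                = ((ls.length : Int) - (((j + 1 + 1) * pn : Nat) : Int)) := by
              rw [hK2]; omega
            have hcount : ((j : Int) + 1) = ((j + 1 : Nat) : Int) := by push_cast; ring
            rw [harg, hcount]
            exact ih (j + 1) (by omega) (by omega) (by rw [hK2]; omega) he2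
        · rw [if_neg hmatch]
          have hg : pvGoodB ls pn (rn + 1) = false := by
            unfold pvGoodB
            apply decide_eq_false
            rintro ⟨h1, h2⟩
            have hj2 : j + 1 + 1 ≤ rn + 1 := by omega
            obtain ⟨h3, h4⟩ := pvGood_mono ls pn (j + 1 + 1) (rn + 1) hj2 hpn_le h1 h2
            apply hmatch
            have h5 : ls.drop (ls.length - K - pn)
                = (List.replicate (j + 1 + 1) (ls.drop (ls.length - pn))).flatten := by
              rw [← h4]; congr 1; rw [hK2]; omega
            rw [h5, List.replicate_succ, List.flatten_cons, List.take_left' hblen]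
          rw [hg]
      · have hlen0 : (PySem.List.slice ls (some (((ls.length - K : Nat) : Int) - (pn : Int)))
              (some ((ls.length - K : Nat) : Int))).length = 0 := by
          rw [PySem.List.length_slice]
          simp only [PySem.List.clampIdx, Nat.min_def]
          split_ifs <;> omega
        have hprevnil : PySem.List.slice ls (some (((ls.length - K : Nat) : Int) - (pn : Int)))
            (some ((ls.length - K : Nat) : Int)) = [] :=
          List.eq_nil_of_length_eq_zero hlen0
        rw [hcur, hprevnil]
        rw [if_neg (by intro h0; rw [h0] at hblen; simp at hblen; omega)]
        have hg : pvGoodB ls pn (rn + 1) = false := by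
          unfold pvGoodB
          apply decide_eq_false
          rintro ⟨h1, -⟩
          have h2 : (j + 1 + 1) * pn ≤ (rn + 1) * pn := mul_le_mul_right' (by omega) pn
          have h3 : (j + 1 + 1) * pn = K + pn := by rw [hKdef]; ring
          have h4 : K + pn ≤ ls.length := le_trans (le_trans h3.ge h2) h1
          omega
        rw [hg]

-- B's per-pattern-length condition equals pvGoodB
theorem pvCondB_eq (ls : List String) (pn rn : Nat) (hpn : pn ≤ ls.length) :
    (if ((rn : Int) + 1) * (pn : Int) ≤ (ls.length : Int) ∧
        PySem.List.slice ls (some ((ls.length : Int) - ((rn : Int) + 1) * (pn : Int))) none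
          = PySem.List.pyRepeat (PySem.List.slice ls (some ((ls.length : Int) - (pn : Int))) none) ((rn : Int) + 1)
      then true else false) = pvGoodB ls pn (rn + 1) := by
  have h1 : (((rn : Int) + 1) * (pn : Int) ≤ (ls.length : Int)) ↔ ((rn + 1) * pn ≤ ls.length) := by
    constructor <;> intro h <;> exact_mod_cast h
  have hrep : PySem.List.pyRepeat (PySem.List.slice ls (some ((ls.length : Int) - (pn : Int))) none) ((rn : Int) + 1)
      = (List.replicate (rn + 1) (ls.drop (ls.length - pn))).flatten := by
    have hs : PySem.List.slice ls (some ((ls.length : Int) - (pn : Int))) none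
        = ls.drop (ls.length - pn) := by
      rw [show ((ls.length : Int) - (pn : Int)) = ((ls.length - pn : Nat) : Int) from by omega,
          PySem.List.slice_from_natCast]
    rw [hs]
    show (List.replicate ((rn : Int) + 1).toNat (ls.drop (ls.length - pn))).flatten
        = (List.replicate (rn + 1) (ls.drop (ls.length - pn))).flatten
    rw [show ((rn : Int) + 1).toNat = rn + 1 from by omega]
  by_cases h : (rn + 1) * pn ≤ ls.length
  · have hsl : PySem.List.slice ls (some ((ls.length : Int) - ((rn : Int) + 1) * (pn : Int))) none
        = ls.drop (ls.length - (rn + 1) * pn) := by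
      rw [show ((ls.length : Int) - ((rn : Int) + 1) * (pn : Int)) = ((ls.length - (rn + 1) * pn : Nat) : Int) from by
            rw [Nat.cast_sub h]; push_cast; ring,
          PySem.List.slice_from_natCast]
    rw [hsl, hrep]
    unfold pvGoodB
    by_cases h2 : ls.drop (ls.length - (rn + 1) * pn)
        = (List.replicate (rn + 1) (ls.drop (ls.length - pn))).flatten
    · rw [if_pos ⟨h1.mpr h, h2⟩, decide_eq_true ⟨h, h2⟩]
    · rw [if_neg (fun hc => h2 hc.2), decide_eq_false (fun hc => h2 hc.2)]
  · rw [if_neg (fun hc => h (h1.mp hc.1))]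
    unfold pvGoodB
    rw [decide_eq_false (fun hc => h hc.1)]

-- the two outer loops agree elementwise, hence globally
theorem pvOuter_eq (ls : List String) (maxr : Int) (rn : Nat)
    (hr : (rn : Int) = max maxr 1) (hrn : 1 ≤ rn) :
    ∀ L : List Int, (∀ p ∈ L, ∃ pn : Nat, p = (pn : Int) ∧ 1 ≤ pn ∧ pn ≤ ls.length) →
    pvOuterA ls maxr L = pvLoopB ls ((rn : Int) + 1) L := by
  intro L
  induction L with
  | nil => intro _; rfl
  | cons p ps ih =>
    intro hmem
    obtain ⟨pn, rfl, hp1, hple⟩ := hmem p (by simp)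
    have hA : pvScanA ls (pn : Int) maxr
        (PySem.List.pyRange ((ls.length : Int) - (pn : Int)) 0 (-(pn : Int))) 0
        = pvGoodB ls pn (rn + 1) := by
      have h0 : ((0 + 1) * pn : Nat) = pn := by omega
      have hbase := pvScan_eq ls pn hp1 maxr rn hr rn 0 (by omega) (by omega)
        (by simpa using hple) (by rw [h0]; simp)
      rw [h0] at hbase
      simpa using hbase
    have hB := pvCondB_eq ls pn rn hple
    simp only [pvOuterA, pvLoopB]
    by_cases hC : (((rn : Int) + 1) * (pn : Int) ≤ (ls.length : Int) ∧
        PySem.List.slice ls (some ((ls.length : Int) - ((rn : Int) + 1) * (pn : Int))) none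
          = PySem.List.pyRepeat (PySem.List.slice ls (some ((ls.length : Int) - (pn : Int))) none) ((rn : Int) + 1))
    · have hGB : pvGoodB ls pn (rn + 1) = true := by rw [← hB, if_pos hC]
      rw [hA, hGB, if_pos hC]
      simp
    · have hGB : pvGoodB ls pn (rn + 1) = false := by rw [← hB, if_neg hC]
      rw [hA, hGB, if_neg hC]
      simp only [Bool.false_eq_true, if_false]
      exact ih fun q hq => hmem q (List.mem_cons_of_mem _ hq)

-- ===== VERDICT (by name: the statement is the Claim_ definition above) =====
theorem detect_repetition_loop_spec : Claim_equal_detect_repetition_loop := by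
  unfold Claim_equal_detect_repetition_loop
  intro text maxr _
  unfold Spec_detect_repetition_loop
  simp only [detect_repetition_loop, detect_repetition_loop_alt]
  by_cases h6 : ((PySem.Str.splitlines text).length : Int) < 6
  · rw [if_pos h6, if_pos h6]
  · rw [if_neg h6, if_neg h6]
    set ls := PySem.Str.splitlines text with hls
    have hn6 : 6 ≤ ls.length := by omega
    have hmaxpos : (0:Int) ≤ max maxr 1 := le_trans (by omega) (le_max_right maxr 1)
    set rn : Nat := (max maxr 1).toNat with hrdef
    have hr : (rn : Int) = max maxr 1 := by rw [hrdef]; exact Int.toNat_of_nonneg hmaxpos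
    have hone : (1:Int) ≤ max maxr 1 := le_max_right maxr 1
    have hrn : 1 ≤ rn := by omega
    have hcop : max maxr 1 + 1 = (rn : Int) + 1 := by omega
    rw [hcop]
    apply pvOuter_eq ls maxr rn hr hrn
    intro p hp
    have hfd : PySem.Int.floordiv ((ls.length : Int)) 2 = (ls.length : Int) / 2 :=
      PySem.Int.floordiv_eq_ediv_of_pos (by norm_num)
    rw [hfd] at hp
    obtain ⟨hp1, hp2⟩ := (PySem.List.mem_pyRange_one).mp hp
    have hp2' : p < (ls.length : Int) / 2 := lt_of_lt_of_le hp2 (min_le_right _ _)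
    refine ⟨p.toNat, by omega, by omega, by omega⟩
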